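-- pv_equiv track=rewrite | github.com/jung-woo-kim/AlgorithmSolving | PYTHON_Programmers/신고_결과_받기.py | solution
-- ===== SOURCE A (Python) =====
-- def solution(id_list, report, k):
--     answer = []
--     rep = set()
--
--     for r in report:
--         rep.add(r)
--
--     user_report = dict()
--     user_reported = dict()
--
--     for id in id_list:
--         user_reported[id] = 0
--         user_report[id] = []
--
--     for r in rep:
--         report_user, reported_user = r.split()
--         user_reported[reported_user] += 1
--         user_report[report_user].append(reported_user)
--
--     for id in id_list:
--         sum = 0
--         for reported_user in user_report[id]:
--             if user_reported[reported_user] >= k: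
--                 sum += 1
--         answer.append(sum)
--
--     return answer
-- ===== SOURCE B (Python) =====
-- def solution(id_list, report, k):
--     edges = [tuple(r.split()) for r in dict.fromkeys(report)]
--     return [sum(1 for a, b in edges
--                 if a == u and sum(1 for _, b2 in edges if b2 == b) >= k)
--             for u in id_list]
-- ===== Notes on version B (the rewrite author's own statement) =====
-- stated objective: simpler
-- what changed: B drops all three of A's dicts (reported-count, per-user adjacency lists, per-id staged summation): it dedupes the reports once into a parsed edge list and computes each answer by direct nested counting over that list, re-counting a reported user's distinct reports inline instead of indexing anything; Pre_ excludes inputs where A raises (a report not splitting into exactly two tokens, or naming a user absent from id_list).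
import Mathlib
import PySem

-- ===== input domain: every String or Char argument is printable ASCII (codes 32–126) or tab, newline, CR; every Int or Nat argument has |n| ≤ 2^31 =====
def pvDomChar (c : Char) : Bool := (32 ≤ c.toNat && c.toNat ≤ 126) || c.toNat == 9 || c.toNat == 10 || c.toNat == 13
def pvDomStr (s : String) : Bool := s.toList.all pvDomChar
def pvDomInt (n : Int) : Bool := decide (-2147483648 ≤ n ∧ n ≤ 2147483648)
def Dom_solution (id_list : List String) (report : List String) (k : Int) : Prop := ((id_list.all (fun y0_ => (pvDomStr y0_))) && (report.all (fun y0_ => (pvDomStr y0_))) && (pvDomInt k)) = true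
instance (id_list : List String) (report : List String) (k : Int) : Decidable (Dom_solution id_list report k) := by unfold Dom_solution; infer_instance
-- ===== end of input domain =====

-- B drops all of A's dicts (reported-count, adjacency lists, staged summation) and computes each
-- answer by direct nested counting over the deduplicated parsed report list (objective: simpler).

-- ===== PORT A =====
def solution (id_list : List String) (report : List String) (k : Int) : List Int :=
  let rep := report.foldl PySem.Set.add (PySem.Set.ofList [])
  let init : PySem.Dict String Int × PySem.Dict String (List String) :=
    id_list.foldl (fun p id => (p.1.insert id 0, p.2.insert id [])) (PySem.Dict.empty, PySem.Dict.empty)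
  let st := rep.foldl (fun (p : PySem.Dict String Int × PySem.Dict String (List String)) r =>
      match PySem.Str.split₀ r with
      | [report_user, reported_user] =>
          (p.1.modify reported_user 0 (· + 1), p.2.modify report_user [] (· ++ [reported_user]))
      | _ => p) init
  id_list.foldl (fun answer id =>
      answer ++ [(st.2.getD id []).foldl
        (fun sum reported_user => if st.1.getD reported_user 0 ≥ k then sum + 1 else sum) 0]) []

-- ===== PORT B =====
def solution_alt (id_list : List String) (report : List String) (k : Int) : List Int :=
  let edges := (PySem.List.dedup report).map (fun r => PySem.Str.split₀ r)
  id_list.map (fun u =>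
    edges.foldl (fun s e =>
      match e with
      | [] => s                      -- 'for a, b in edges' unpack raises on a ≠ 2-token edge: excluded by Pre_
      | [_] => s
      | _ :: _ :: _ :: _ => s
      | [a, b] =>
          if a = u ∧ k ≤ edges.foldl (fun t e2 =>
                match e2 with
                | [] => t            -- 'for _, b2 in edges' likewise raises off 2-token edges: excluded by Pre_
                | [_] => t
                | _ :: _ :: _ :: _ => t
                | [_, b2] => if b2 = b then t + 1 else t) (0 : Int)
          then s + 1 else s) (0 : Int))

-- ===== PRECONDITION & SPEC =====
-- Pre_ excludes exactly the inputs on which A raises: a report string that does not split into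
-- exactly two whitespace-separated tokens (ValueError on unpacking), or one naming a user
-- absent from id_list (KeyError).
def Pre_solution (id_list : List String) (report : List String) (k : Int) : Prop :=
  (report.all (fun r =>
    ((PySem.Str.split₀ r).length == 2) && (PySem.Str.split₀ r).all (fun t => id_list.contains t))) = true
instance (id_list : List String) (report : List String) (k : Int) : Decidable (Pre_solution id_list report k) := by unfold Pre_solution; infer_instance

def pvWitness_solution : List String × List String × Int := (["muzi", "frodo", "apeach"], ["muzi frodo", "apeach muzi", "muzi frodo"], 2)

def Spec_solution (id_list : List String) (report : List String) (k : Int) (out : List Int) : Prop := out = solution_alt id_list report k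
instance (id_list : List String) (report : List String) (k : Int) (out : List Int) : Decidable (Spec_solution id_list report k out) := by unfold Spec_solution; infer_instance

-- ===== CLAIM (what is proved, stated in full; the proofs are below) =====
def Claim_equal_solution : Prop := ∀ (id_list : List String) (report : List String) (k : Int), Dom_solution id_list report k → Pre_solution id_list report k → Spec_solution id_list report k (solution id_list report k)

-- ===== LEMMAS AND PROOFS =====

-- (reporter, reported) of a well-formed report line (proof-side view; the ports keep the match)
def pvParse (r : String) : String × String :=
  match PySem.Str.split₀ r with
  | [a, b] => (a, b)
  | _ => ("", "")

-- reported-count of user u over the parsed deduplicated reports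
def pvCnt (E : List (String × String)) (u : String) : Int := ((E.map (·.2)).count u : Int)

-- common normal form both ports are reduced to
def pvTarget (id_list : List String) (report : List String) (k : Int) : List Int :=
  id_list.map (fun id =>
    (List.countP (fun p => (p.1 == id) && decide (k ≤ pvCnt ((PySem.List.dedup report).map pvParse) p.2))
      ((PySem.List.dedup report).map pvParse) : Int))

lemma pre_form {id_list report : List String} {k : Int} (hpre : Pre_solution id_list report k) :
    ∀ r ∈ PySem.List.dedup report,
      PySem.Str.split₀ r = [(pvParse r).1, (pvParse r).2] ∧ (pvParse r).1 ∈ id_list ∧ (pvParse r).2 ∈ id_list := by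
  intro r hr
  have hr' : r ∈ report := (PySem.Set.mem_ofList report r).mp hr
  have h := (List.all_eq_true.mp hpre) r hr'
  simp only [Bool.and_eq_true, beq_iff_eq, List.all_eq_true, List.contains_iff_mem] at h
  obtain ⟨hlen, hall⟩ := h
  cases hs : PySem.Str.split₀ r with
  | nil => rw [hs] at hlen; simp at hlen
  | cons a t =>
    cases t with
    | nil => rw [hs] at hlen; simp at hlen
    | cons b t2 =>
      cases t2 with
      | nil =>
        rw [hs] at hall
        refine ⟨by simp [pvParse, hs], ?_, ?_⟩
        · simpa [pvParse, hs] using hall a (by simp)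
        · simpa [pvParse, hs] using hall b (by simp)
      | cons cc t3 => rw [hs] at hlen; simp at hlen

lemma getD_foldl_insert_const {ν : Type} (l : List String) (c : ν) (d : PySem.Dict String ν)
    (v : String) (h : d.getD v c = c) :
    (l.foldl (fun d u => d.insert u c) d).getD v c = c := by
  induction l generalizing d with
  | nil => exact h
  | cons x xs ih =>
    refine ih _ ?_
    rw [PySem.Dict.getD_insert]
    split <;> [rfl; exact h]

lemma foldl_count_if' {α : Type} (P : α → Prop) [DecidablePred P] (l : List α) (a : Int) :
    l.foldl (fun acc x => if P x then acc + 1 else acc) a = a + (l.countP (fun x => decide (P x)) : Int) := by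
  have h := PySem.List.foldl_count_if (fun x => decide (P x)) l a
  simpa using h

lemma stA_eq (id_list D : List String)
    (hform : ∀ r ∈ D, PySem.Str.split₀ r = [(pvParse r).1, (pvParse r).2]) :
    D.foldl (fun (p : PySem.Dict String Int × PySem.Dict String (List String)) r =>
        match PySem.Str.split₀ r with
        | [report_user, reported_user] =>
            (p.1.modify reported_user 0 (· + 1), p.2.modify report_user [] (· ++ [reported_user]))
        | _ => p)
      (id_list.foldl (fun p id => (p.1.insert id 0, p.2.insert id [])) (PySem.Dict.empty, PySem.Dict.empty))
    = ((D.map pvParse).foldl (fun d p => d.modify p.2 0 (· + 1))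
         (id_list.foldl (fun d u => d.insert u 0) PySem.Dict.empty),
       (D.map pvParse).foldl (fun d p => d.modify p.1 [] (· ++ [p.2]))
         (id_list.foldl (fun d u => d.insert u []) PySem.Dict.empty)) := by
  have h1 : D.foldl (fun (p : PySem.Dict String Int × PySem.Dict String (List String)) r =>
        match PySem.Str.split₀ r with
        | [report_user, reported_user] =>
            (p.1.modify reported_user 0 (· + 1), p.2.modify report_user [] (· ++ [reported_user]))
        | _ => p)
      (id_list.foldl (fun p id => (p.1.insert id 0, p.2.insert id [])) (PySem.Dict.empty, PySem.Dict.empty))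
      = D.foldl (fun (p : PySem.Dict String Int × PySem.Dict String (List String)) r =>
          (p.1.modify (pvParse r).2 0 (· + 1), p.2.modify (pvParse r).1 [] (· ++ [(pvParse r).2])))
        (id_list.foldl (fun p id => (p.1.insert id 0, p.2.insert id [])) (PySem.Dict.empty, PySem.Dict.empty)) := by
    apply PySem.List.foldl_congr_mem
    intro acc r hr
    rw [hform r hr]
  rw [h1]
  rw [PySem.List.foldl_prod_mk (fun (d : PySem.Dict String Int) (u : String) => d.insert u 0)
    (fun (d : PySem.Dict String (List String)) (u : String) => d.insert u []) id_list PySem.Dict.empty PySem.Dict.empty]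
  rw [PySem.List.foldl_prod_mk (fun (d : PySem.Dict String Int) (r : String) => d.modify (pvParse r).2 0 (· + 1))
    (fun (d : PySem.Dict String (List String)) (r : String) => d.modify (pvParse r).1 [] (· ++ [(pvParse r).2])) D _ _]
  rw [← List.foldl_map (f := pvParse) (g := fun (d : PySem.Dict String Int) (p : String × String) => d.modify p.2 0 (· + 1))]
  rw [← List.foldl_map (f := pvParse) (g := fun (d : PySem.Dict String (List String)) (p : String × String) => d.modify p.1 [] (· ++ [p.2]))]

lemma A_eq (id_list report : List String) (k : Int) (hpre : Pre_solution id_list report k) :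
    solution id_list report k = pvTarget id_list report k := by
  have hform := pre_form hpre
  unfold solution
  simp only []
  rw [show report.foldl PySem.Set.add (PySem.Set.ofList []) = PySem.List.dedup report from rfl]
  rw [stA_eq id_list (PySem.List.dedup report) (fun r hr => (hform r hr).1)]
  rw [PySem.List.foldl_append_singleton_eq_map, List.nil_append]
  unfold pvTarget
  apply List.map_congr_left
  intro id _
  simp only []
  have hadj : (((PySem.List.dedup report).map pvParse).foldl (fun d p => d.modify p.1 [] (· ++ [p.2]))
        (id_list.foldl (fun d u => d.insert u []) PySem.Dict.empty)).getD id []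
      = (((PySem.List.dedup report).map pvParse).filter (fun p => p.1 == id)).map (·.2) := by
    rw [PySem.Dict.getD_foldl_modify_append, getD_foldl_insert_const _ _ _ _ rfl, List.nil_append]
  have hcnt : ∀ u, (((PySem.List.dedup report).map pvParse).foldl (fun d p => d.modify p.2 0 (· + 1))
        (id_list.foldl (fun d u => d.insert u 0) PySem.Dict.empty)).getD u 0
      = pvCnt ((PySem.List.dedup report).map pvParse) u := by
    intro u
    rw [List.foldl_map (g := fun (d : PySem.Dict String Int) x => d.modify x 0 (· + 1)) (f := fun (p : String × String) => p.2) |>.symm]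
    rw [PySem.Dict.getD_foldl_modify_add_one, getD_foldl_insert_const _ _ _ _ rfl, zero_add]
    rfl
  rw [hadj]
  simp only [hcnt]
  rw [foldl_count_if' (fun du => pvCnt ((PySem.List.dedup report).map pvParse) du ≥ k)]
  rw [List.countP_map, List.countP_filter, zero_add]
  congr 1
  apply List.countP_congr
  intro p _
  simp [Function.comp, ge_iff_le, Bool.and_comm]

lemma B_eq (id_list report : List String) (k : Int) (hpre : Pre_solution id_list report k) :
    solution_alt id_list report k = pvTarget id_list report k := by
  have hform := pre_form hpre
  unfold solution_alt
  simp only []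
  set D := PySem.List.dedup report with hD
  set E := D.map pvParse with hE
  have hedges : D.map (fun r => PySem.Str.split₀ r) = E.map (fun p => [p.1, p.2]) := by
    rw [hE, List.map_map]
    exact List.map_congr_left (fun r hr => (hform r hr).1)
  rw [hedges]
  unfold pvTarget
  rw [← hD, ← hE]
  apply List.map_congr_left
  intro u _
  have hinner : ∀ b : String,
      (E.map (fun p => [p.1, p.2])).foldl (fun t e2 =>
          match e2 with
          | [] => t
          | [_] => t
          | _ :: _ :: _ :: _ => t
          | [_, b2] => if b2 = b then t + 1 else t) (0 : Int) = pvCnt E b := by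
    intro b
    rw [List.foldl_map]
    simp only []
    rw [foldl_count_if' (fun p : String × String => p.2 = b)]
    unfold pvCnt
    rw [List.count_eq_countP, List.countP_map, List.countP_map, zero_add]
    congr 1
    rw [hE, List.countP_map]
    apply List.countP_congr
    intro r _
    simp
  rw [List.foldl_map]
  simp only [hinner]
  rw [foldl_count_if' (fun p : String × String => p.1 = u ∧ k ≤ pvCnt E p.2)]
  rw [zero_add]
  congr 1
  apply List.countP_congr
  intro p _
  simp

-- ===== VERDICT (by name: the statement is the Claim_ definition above) =====
theorem solution_spec : Claim_equal_solution := by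
  intro id_list report k _ hpre
  unfold Spec_solution
  rw [A_eq id_list report k hpre, B_eq id_list report k hpre]
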